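-- pv_equiv track=rewrite | github.com/JakePaulRose/Orion | bin_tools.py | segment_times
-- ===== SOURCE A (Python) =====
-- def segment_times(timeseries, max_gap):
--     """
--     Returns an N-D array where each row represents a separate segmentation of continuous data with no gaps
--     greater than the max gap.
--     """
--     time_segments = []
--     is_contiguous = False
--     arr_n = -1
--     for i, t in enumerate(timeseries):
--         if not is_contiguous:
--             time_segments.append([t])
--             arr_n += 1
--         else:
--             time_segments[arr_n].append(t)
--         if i + 1 < len(timeseries):
--             is_contiguous = (timeseries[i + 1] - t) < max_gap
--     return time_segments
-- ===== SOURCE B (Python) =====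
-- def segment_times(timeseries, max_gap):
--     """Two-pass reimplementation: first find the cut indices where the gap is
--     >= max_gap, then materialise each segment as a slice between bounds."""
--     n = len(timeseries)
--     if n == 0:
--         return []
--     bounds = [0]
--     for i in range(1, n):
--         if timeseries[i] - timeseries[i - 1] >= max_gap:
--             bounds.append(i)
--     bounds.append(n)
--     return [list(timeseries[a:b]) for a, b in zip(bounds, bounds[1:])]
-- ===== Notes on version B (the rewrite author's own statement) =====
-- stated objective: alternative
-- what changed: Replaces A's single interleaved loop (lookahead contiguity flag plus append-into-last-segment bookkeeping) by two separate passes: one pass collecting the boundary indices where the gap is >= max_gap, then materialising each segment as a bulk slice between consecutive bounds.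
import Mathlib
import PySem

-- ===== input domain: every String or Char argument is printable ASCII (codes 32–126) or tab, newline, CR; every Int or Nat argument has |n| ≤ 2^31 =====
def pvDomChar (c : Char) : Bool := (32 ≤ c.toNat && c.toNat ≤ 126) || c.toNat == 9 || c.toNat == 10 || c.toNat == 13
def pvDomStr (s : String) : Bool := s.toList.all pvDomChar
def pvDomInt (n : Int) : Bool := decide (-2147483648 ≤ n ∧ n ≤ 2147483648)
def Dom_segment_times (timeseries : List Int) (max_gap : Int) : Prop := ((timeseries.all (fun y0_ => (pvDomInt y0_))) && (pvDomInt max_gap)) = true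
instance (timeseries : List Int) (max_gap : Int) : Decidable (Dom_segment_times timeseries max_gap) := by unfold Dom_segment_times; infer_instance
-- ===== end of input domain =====

-- B replaces A's interleaved lookahead loop by two passes (collect cut indices, then slice); same O(n) cost, proved equal on all inputs.

-- ===== PORT A =====
-- loop body of A's for-loop; state = (time_segments, is_contiguous, arr_n)
def stepA (ts : List Int) (g : Int) (st : List (List Int) × Bool × Int) (it : Int × Int) :
    List (List Int) × Bool × Int :=
  let segs := st.1
  let isc := st.2.1
  let arrn := st.2.2
  let (segs, arrn) :=
    if !isc then (segs ++ [[it.2]], arrn + 1)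
    else (segs.modify arrn.toNat (fun s => s ++ [it.2]), arrn)
      -- time_segments[arr_n].append(t); arr_n ≥ 0 whenever this branch runs, so .toNat is exact
  let isc :=
    if it.1 + 1 < (ts.length : Int) then
      match PySem.List.pyGet? ts (it.1 + 1) with
      | some nxt => decide (nxt - it.2 < g)
      | none => isc   -- unreachable: it.1 + 1 is in range here
    else isc
  (segs, isc, arrn)

def segment_times (timeseries : List Int) (max_gap : Int) : List (List Int) :=
  ((PySem.List.enumerate timeseries).foldl (stepA timeseries max_gap) ([], false, -1)).1

-- ===== PORT B =====
-- loop body of B's bounds-collecting pass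
def stepB (ts : List Int) (g : Int) (bounds : List Int) (i : Int) : List Int :=
  if g ≤ PySem.List.pyGetD ts i 0 - PySem.List.pyGetD ts (i - 1) 0 then bounds ++ [i]
  else bounds
  -- timeseries[i] / timeseries[i-1]: i ranges over range(1, n), so both indices are in range and pyGetD is exact

def segment_times_alt (timeseries : List Int) (max_gap : Int) : List (List Int) :=
  let n : Int := timeseries.length
  if n = 0 then []
  else
    let bounds := (PySem.List.pyRange 1 n 1).foldl (stepB timeseries max_gap) [0]
    let bounds := bounds ++ [n]
    (bounds.zip (PySem.List.slice bounds (some 1) none)).map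
      (fun ab => PySem.List.slice timeseries (some ab.1) (some ab.2))

-- ===== PRECONDITION & SPEC =====
def Spec_segment_times (timeseries : List Int) (max_gap : Int) (out : List (List Int)) : Prop := out = segment_times_alt timeseries max_gap
instance (timeseries : List Int) (max_gap : Int) (out : List (List Int)) : Decidable (Spec_segment_times timeseries max_gap out) := by unfold Spec_segment_times; infer_instance

-- ===== CLAIM (what is proved, stated in full; the proofs are below) =====
def Claim_equal_segment_times : Prop := ∀ (timeseries : List Int) (max_gap : Int), Dom_segment_times timeseries max_gap → Spec_segment_times timeseries max_gap (segment_times timeseries max_gap)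

-- ===== LEMMAS AND PROOFS =====

-- common reference recursion: greedy left-to-right chunking
def goC (g : Int) : Int → List Int → List Int → List (List Int)
  | _, cur, [] => [cur]
  | prev, cur, u :: rest =>
    if u - prev < g then goC g u (cur ++ [u]) rest
    else cur :: goC g u [u] rest

def chunks (ts : List Int) (g : Int) : List (List Int) :=
  match ts with
  | [] => []
  | t :: rest => goC g t [t] rest

lemma modify_append_last (done : List (List Int)) (cur : List Int) (f : List Int → List Int) :
    (done ++ [cur]).modify done.length f = done ++ [f cur] := by
  rw [List.modify_eq_set_getElem?]
  simp

lemma foldA_split (g : Int) (ts : List Int) :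
    ∀ suf pre : List Int, ∀ prev : Int,
      ts = pre ++ prev :: suf →
      (∀ segs : List (List Int),
        ((PySem.List.enumerate (prev :: suf) (pre.length : Int)).foldl (stepA ts g)
          (segs, false, (segs.length : Int) - 1)).1 = segs ++ goC g prev [prev] suf)
      ∧
      (∀ (done : List (List Int)) (cur : List Int),
        ((PySem.List.enumerate (prev :: suf) (pre.length : Int)).foldl (stepA ts g)
          (done ++ [cur], true, (done.length : Int))).1 = done ++ goC g prev (cur ++ [prev]) suf) := by
  intro suf
  induction suf with
  | nil =>
    intro pre prev hts
    have hc : ¬ ((pre.length : Int) + 1 < (ts.length : Int)) := by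
      subst hts; simp
    constructor
    · intro segs
      rw [PySem.List.enumerate_cons, List.foldl_cons]
      simp [stepA, hc, goC]
    · intro done cur
      rw [PySem.List.enumerate_cons, List.foldl_cons]
      simp [stepA, hc, goC, modify_append_last]
  | cons u suf' ih =>
    intro pre prev hts
    have hts' : ts = (pre ++ [prev]) ++ u :: suf' := by simp [hts]
    have hstart : ((pre ++ [prev]).length : Int) = (pre.length : Int) + 1 := by
      simp
    have hget : PySem.List.pyGet? ts ((pre.length : Int) + 1) = some u := by
      rw [← hstart, hts', PySem.List.pyGet?_append_length]
    have hcond : ((pre.length : Int) + 1 < (ts.length : Int)) := by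
      subst hts; simp
    have ihf := (ih (pre ++ [prev]) u hts').1
    have iht := (ih (pre ++ [prev]) u hts').2
    rw [hstart] at ihf iht
    constructor
    · intro segs
      rw [PySem.List.enumerate_cons, List.foldl_cons]
      have hstep : stepA ts g (segs, false, (segs.length : Int) - 1) ((pre.length : Int), prev)
          = (segs ++ [[prev]], decide (u - prev < g), (segs.length : Int)) := by
        simp [stepA, hcond, hget]
      rw [hstep]
      by_cases hb : u - prev < g
      · have h2 := iht segs [prev]
        simp only [hb, decide_true]
        rw [h2]
        simp [goC, hb]
      · have h1 := ihf (segs ++ [[prev]])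
        have hl : ((segs ++ [[prev]]).length : Int) - 1 = (segs.length : Int) := by simp
        rw [hl] at h1
        simp only [hb, decide_false]
        rw [h1]
        simp [goC, hb]
    · intro done cur
      rw [PySem.List.enumerate_cons, List.foldl_cons]
      have hstep : stepA ts g (done ++ [cur], true, (done.length : Int)) ((pre.length : Int), prev)
          = (done ++ [cur ++ [prev]], decide (u - prev < g), (done.length : Int)) := by
        simp [stepA, hcond, hget, modify_append_last]
      rw [hstep]
      by_cases hb : u - prev < g
      · have h2 := iht done (cur ++ [prev])
        simp only [hb, decide_true]
        rw [h2]
        simp [goC, hb]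
      · have h1 := ihf (done ++ [cur ++ [prev]])
        have hl : ((done ++ [cur ++ [prev]]).length : Int) - 1 = (done.length : Int) := by simp
        rw [hl] at h1
        simp only [hb, decide_false]
        rw [h1]
        simp [goC, hb]

lemma A_eq_chunks (ts : List Int) (g : Int) : segment_times ts g = chunks ts g := by
  cases ts with
  | nil => simp [segment_times, chunks, PySem.List.enumerate]
  | cons t rest =>
    have h := (foldA_split g (t :: rest) rest [] t (by simp)).1 ([])
    simp only [List.length_nil, Nat.cast_zero] at h
    unfold segment_times chunks
    rw [show ((0 : Int) - 1) = (-1 : Int) by ring] at h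
    exact h

lemma foldl_stepB (ts : List Int) (g : Int) :
    ∀ (l : List Int) (acc : List Int),
      l.foldl (stepB ts g) acc
        = acc ++ l.filter (fun i => decide (g ≤ PySem.List.pyGetD ts i 0 - PySem.List.pyGetD ts (i - 1) 0)) := by
  intro l
  induction l with
  | nil => simp
  | cons x xs ih =>
    intro acc
    by_cases h : g ≤ PySem.List.pyGetD ts x 0 - PySem.List.pyGetD ts (x - 1) 0 <;>
      simp [stepB, h, ih]

def cutsFrom (ts : List Int) (g : Int) (k : Nat) : List Int :=
  (PySem.List.pyRange (k : Int) (ts.length : Int) 1).filter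
    (fun i => decide (g ≤ PySem.List.pyGetD ts i 0 - PySem.List.pyGetD ts (i - 1) 0))

lemma pyRange_one_nil (a b : Int) (h : b ≤ a) : PySem.List.pyRange a b 1 = [] := by
  simp [PySem.List.pyRange]
  omega

lemma slice_snoc (ts : List Int) (s m : Nat) (x : Int) (hsm : s ≤ m) (hx : ts[m]? = some x) :
    PySem.List.slice ts (some (s : Int)) (some (m : Int)) ++ [x]
      = PySem.List.slice ts (some (s : Int)) (some ((m + 1 : Nat) : Int)) := by
  rw [PySem.List.slice_natCast, PySem.List.slice_natCast]
  have h1 : m + 1 - s = (m - s) + 1 := by omega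
  rw [h1, List.take_add_one]
  have h2 : (ts.drop s)[m - s]? = some x := by
    rw [List.getElem?_drop, Nat.add_sub_cancel' hsm, hx]
  rw [h2]
  rfl

lemma B_slices (g : Int) (ts : List Int) :
    ∀ suf pre : List Int, ∀ prev : Int,
      ts = pre ++ prev :: suf →
      ∀ s : Nat, s ≤ pre.length →
      ∀ cur : List Int,
        cur = PySem.List.slice ts (some (s : Int)) (some ((pre.length + 1 : Nat) : Int)) →
      goC g prev cur suf
        = ((((s : Int) :: (cutsFrom ts g (pre.length + 1) ++ [(ts.length : Int)])).zip
              (cutsFrom ts g (pre.length + 1) ++ [(ts.length : Int)])).map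
            (fun ab => PySem.List.slice ts (some ab.1) (some ab.2))) := by
  intro suf
  induction suf with
  | nil =>
    intro pre prev hts s hs cur hcur
    have hlen : ts.length = pre.length + 1 := by simp [hts]
    have hF : cutsFrom ts g (pre.length + 1) = [] := by
      unfold cutsFrom
      rw [hlen, pyRange_one_nil _ _ (le_refl _)]
      rfl
    rw [hF]
    simp [goC, hcur, hlen]
  | cons u suf' ih =>
    intro pre prev hts s hs cur hcur
    have hts' : ts = (pre ++ [prev]) ++ u :: suf' := by simp [hts]
    have hlen : ts.length = pre.length + suf'.length + 2 := by simp [hts]; omega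
    have hu : ts[pre.length + 1]? = some u := by
      rw [hts', List.getElem?_append_right (by simp)]
      simp
    have hprev : ts[pre.length]? = some prev := by
      rw [hts, List.getElem?_append_right (le_refl _)]
      simp
    have hgu : PySem.List.pyGetD ts ((pre.length + 1 : Nat) : Int) 0 = u := by
      rw [PySem.List.pyGetD_natCast, List.getD_eq_getElem?_getD, hu]
      rfl
    have hgprev : PySem.List.pyGetD ts (((pre.length + 1 : Nat) : Int) - 1) 0 = prev := by
      have h0 : (((pre.length + 1 : Nat) : Int) - 1) = ((pre.length : Nat) : Int) := by push_cast; ring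
      rw [h0, PySem.List.pyGetD_natCast, List.getD_eq_getElem?_getD, hprev]
      rfl
    have hrange : PySem.List.pyRange ((pre.length + 1 : Nat) : Int) (ts.length : Int) 1
        = ((pre.length + 1 : Nat) : Int) :: PySem.List.pyRange ((pre.length + 2 : Nat) : Int) (ts.length : Int) 1 := by
      rw [PySem.List.pyRange_one_cons (by rw [hlen]; push_cast; omega)]
      congr 1
    have h2 : (pre ++ [prev]).length + 1 = pre.length + 2 := by simp
    by_cases hp : g ≤ u - prev
    · have hF : cutsFrom ts g (pre.length + 1)
          = ((pre.length + 1 : Nat) : Int) :: cutsFrom ts g (pre.length + 2) := by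
        unfold cutsFrom
        rw [hrange, List.filter_cons, hgu, hgprev]
        simp [hp]
      have hcur1 : ([u] : List Int)
          = PySem.List.slice ts (some ((pre.length + 1 : Nat) : Int)) (some (((pre ++ [prev]).length + 1 : Nat) : Int)) := by
        rw [h2, PySem.List.slice_natCast]
        have hd : ts.drop (pre.length + 1) = u :: suf' := by
          rw [hts', show pre.length + 1 = (pre ++ [prev]).length by simp, List.drop_left]
        rw [hd]
        simp
      have ihx := ih (pre ++ [prev]) u hts' (pre.length + 1) (by simp) [u] hcur1
      rw [h2] at ihx
      have hngt : ¬ (u - prev < g) := by omega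
      simp only [goC]
      rw [if_neg hngt, hF]
      simp only [List.cons_append, List.zip_cons_cons, List.map_cons]
      rw [hcur, ihx]
    · have hF : cutsFrom ts g (pre.length + 1) = cutsFrom ts g (pre.length + 2) := by
        unfold cutsFrom
        rw [hrange, List.filter_cons, hgu, hgprev]
        simp [hp]
      have hlt : u - prev < g := by omega
      have hcur2 : cur ++ [u]
          = PySem.List.slice ts (some (s : Int)) (some (((pre ++ [prev]).length + 1 : Nat) : Int)) := by
        rw [h2, hcur]
        exact slice_snoc ts s (pre.length + 1) u (by omega) hu
      have ihx := ih (pre ++ [prev]) u hts' s (by simp; omega) (cur ++ [u]) hcur2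
      rw [h2] at ihx
      simp only [goC]
      rw [if_pos hlt, hF]
      exact ihx

lemma B_eq_chunks (ts : List Int) (g : Int) : segment_times_alt ts g = chunks ts g := by
  cases ts with
  | nil => simp [segment_times_alt, chunks]
  | cons t rest =>
    have hn : ((t :: rest).length : Int) ≠ 0 := by simp; omega
    have hB := B_slices g (t :: rest) rest [] t (by simp) 0 (by simp) [t] (by
      rw [PySem.List.slice_natCast]
      simp)
    simp only [segment_times_alt]
    rw [if_neg hn]
    rw [foldl_stepB, PySem.List.slice_from_one]
    simp only [List.length_nil, Nat.cast_zero, Nat.zero_add] at hB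
    rw [show chunks (t :: rest) g = goC g t [t] rest from rfl, hB]
    congr 1

-- ===== VERDICT (by name: the statement is the Claim_ definition above) =====
theorem segment_times_spec : Claim_equal_segment_times := by
  intro ts g _
  unfold Spec_segment_times
  rw [A_eq_chunks, B_eq_chunks]
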